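-- pv_equiv track=rewrite | github.com/christinaahe/cs4100-final-proj | HMM_Class/test.py | clean_notes
-- ===== SOURCE A (Python) =====
-- def clean_notes(notes):
--     notes_norests = [n for n in notes if n != -1]
--     num_notes = len(notes_norests)
--     if num_notes == 1:
--         return notes_norests*2
--     if num_notes == 2:
--         return notes_norests
--     if num_notes >= 3:
--         return [notes_norests[0], notes_norests[2]]
--     return []
-- ===== SOURCE B (Python) =====
-- def clean_notes(notes):
--     def nxt(i):
--         while i < len(notes):
--             if notes[i] != -1:
--                 return i
--             i += 1
--         return None
--     i = nxt(0)
--     if i is None: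
--         return []
--     j = nxt(i + 1)
--     if j is None:
--         return [notes[i], notes[i]]
--     k = nxt(j + 1)
--     if k is None:
--         return [notes[i], notes[j]]
--     return [notes[i], notes[k]]
-- ===== Notes on version B (the rewrite author's own statement) =====
-- stated objective: alternative
-- what changed: B never builds the filtered list or counts it: it performs three staged index scans locating the positions of the 1st, 2nd and 3rd non-rest notes, returning early as soon as a scan fails, and reads the answer out of the original list by index.
import Mathlib
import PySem

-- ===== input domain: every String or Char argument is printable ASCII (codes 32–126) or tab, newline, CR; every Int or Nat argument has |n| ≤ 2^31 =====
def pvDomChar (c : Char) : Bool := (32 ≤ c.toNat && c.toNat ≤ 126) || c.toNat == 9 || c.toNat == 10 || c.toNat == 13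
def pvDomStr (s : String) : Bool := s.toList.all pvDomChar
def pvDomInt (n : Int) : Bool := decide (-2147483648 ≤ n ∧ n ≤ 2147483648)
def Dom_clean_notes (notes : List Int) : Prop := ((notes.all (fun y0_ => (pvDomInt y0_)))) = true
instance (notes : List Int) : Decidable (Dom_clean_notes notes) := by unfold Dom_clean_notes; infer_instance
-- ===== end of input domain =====

-- B replaces A's filter-then-count-then-index strategy with three staged index scans locating the
-- 1st/2nd/3rd non-rest positions, stopping at the 3rd; objective: alternative decomposition.

-- ===== PORT A =====
-- A filters out rests, then branches on the length of the full filtered list.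
-- In the num_notes ≥ 3 branch the indices 0 and 2 are always in range, so the
-- `.getD 0` defaults of pyGet? are never used.
def clean_notes (notes : List Int) : List Int :=
  let notes_norests := notes.filter (fun n => n ≠ -1)
  let num_notes : Int := notes_norests.length
  if num_notes = 1 then notes_norests ++ notes_norests
  else if num_notes = 2 then notes_norests
  else if num_notes ≥ 3 then
    [(PySem.List.pyGet? notes_norests 0).getD 0, (PySem.List.pyGet? notes_norests 2).getD 0]
  else []

-- ===== PORT B =====
-- the `while` loop of nxt: scan forward from index i for the next non-rest note
def cnNext (notes : List Int) (i : Nat) : Option Nat :=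
  if h : i < notes.length then
    if notes[i] ≠ -1 then some i else cnNext notes (i + 1)
  else none
termination_by notes.length - i

-- indices returned by cnNext are in range, so `getD 0` is never the default (as notes[i] in Python)
def clean_notes_alt (notes : List Int) : List Int :=
  match cnNext notes 0 with
  | none => []
  | some i =>
    match cnNext notes (i + 1) with
    | none => [notes.getD i 0, notes.getD i 0]
    | some j =>
      match cnNext notes (j + 1) with
      | none => [notes.getD i 0, notes.getD j 0]
      | some k => [notes.getD i 0, notes.getD k 0]

-- ===== PRECONDITION & SPEC =====
def Spec_clean_notes (notes : List Int) (out : List Int) : Prop := out = clean_notes_alt notes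
instance (notes : List Int) (out : List Int) : Decidable (Spec_clean_notes notes out) := by unfold Spec_clean_notes; infer_instance

-- ===== CLAIM =====
def Claim_equal_clean_notes : Prop := ∀ (notes : List Int), Dom_clean_notes notes → Spec_clean_notes notes (clean_notes notes)

-- ===== LEMMAS AND PROOFS =====

-- the filtered suffix from position i is characterised by the staged scan cnNext
theorem cnNext_filter (notes : List Int) (i : Nat) :
    (notes.drop i).filter (fun n => n ≠ -1) =
      match cnNext notes i with
      | none => []
      | some j => notes.getD j 0 :: (notes.drop (j + 1)).filter (fun n => n ≠ -1) := by
  rw [cnNext]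
  by_cases h : i < notes.length
  · rw [dif_pos h]
    by_cases hn : notes[i] ≠ -1
    · rw [if_pos hn]
      rw [List.drop_eq_getElem_cons h, List.filter_cons]
      simp [hn, List.getElem?_eq_getElem h]
    · rw [if_neg hn]
      have ih := cnNext_filter notes (i + 1)
      rw [List.drop_eq_getElem_cons h, List.filter_cons]
      simp only [ne_eq, not_not] at hn
      simpa [hn] using ih
  · rw [dif_neg h]
    simp [List.drop_eq_nil_of_le (le_of_not_gt h)]
termination_by notes.length - i

-- consequences of cnNext_filter for a known scan outcome
theorem cnNext_none_filter (notes : List Int) (i : Nat) (h : cnNext notes i = none) :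
    (notes.drop i).filter (fun n => n ≠ -1) = [] := by
  have hf := cnNext_filter notes i; rw [h] at hf; exact hf

theorem cnNext_some_filter (notes : List Int) (i j : Nat) (h : cnNext notes i = some j) :
    (notes.drop i).filter (fun n => n ≠ -1) =
      notes.getD j 0 :: (notes.drop (j + 1)).filter (fun n => n ≠ -1) := by
  have hf := cnNext_filter notes i; rw [h] at hf; exact hf

-- A's result, expressed by case analysis on the shape of the filtered list
theorem clean_notes_shape (notes : List Int) :
    clean_notes notes =
      match notes.filter (fun n => n ≠ -1) with
      | [] => []
      | [a] => [a, a]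
      | [a, b] => [a, b]
      | a :: _ :: c :: _ => [a, c] := by
  unfold clean_notes
  rcases h : notes.filter (fun n => n ≠ -1) with _ | ⟨a, _ | ⟨b, _ | ⟨c, tl⟩⟩⟩ <;>
      simp only [ne_eq, decide_not] at h
  · simp [h]
  · simp [h, PySem.List.pyGet?, PySem.List.pyIdx?]
  · simp [h, PySem.List.pyGet?, PySem.List.pyIdx?]
  · simp [h, PySem.List.pyGet?, PySem.List.pyIdx?]
    split_ifs <;> first | omega | simp

-- ===== VERDICT =====
theorem clean_notes_spec : Claim_equal_clean_notes := by
  intro notes _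
  unfold Spec_clean_notes clean_notes_alt
  rw [clean_notes_shape]
  rcases e0 : cnNext notes 0 with _ | i
  · have h0 := cnNext_none_filter notes 0 e0
    rw [List.drop_zero] at h0
    rw [h0]
  · have h0 := cnNext_some_filter notes 0 i e0
    rw [List.drop_zero] at h0
    rw [h0]
    rcases e1 : cnNext notes (i + 1) with _ | j
    · rw [cnNext_none_filter notes (i + 1) e1]
      simp [e1]
    · rw [cnNext_some_filter notes (i + 1) j e1]
      rcases e2 : cnNext notes (j + 1) with _ | k
      · rw [cnNext_none_filter notes (j + 1) e2]
        simp [e1, e2]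
      · rw [cnNext_some_filter notes (j + 1) k e2]
        simp [e1, e2]
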